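-- pv_equiv track=rewrite | github.com/aquanauts/tellus | tellus/tellus_sources/socializer.py | coffee_from_schedule
-- ===== SOURCE A (Python) =====
-- def coffee_from_schedule(username, coffee_schedule):
--     index = next(
--         (
--             pair
--             for pair, tuple in enumerate(coffee_schedule)
--             if tuple[0] == username or tuple[1] == username
--         ),
--         None,
--     )
--     if index is None:
--         return None
--
--     coffee_pair = coffee_schedule[index]
--     if coffee_pair[0] == username:
--         return coffee_pair[1]
--     else:
--         return coffee_pair[0]
-- ===== SOURCE B (Python) =====
-- def coffee_from_schedule(username, coffee_schedule):
--     table = {}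
--     for pair in coffee_schedule:
--         table.setdefault(pair[0], pair[1])
--         table.setdefault(pair[1], pair[0])
--     return table.get(username, None)
-- ===== Notes on version B (the rewrite author's own statement) =====
-- stated objective: idiomatic
-- what changed: Replaces A's enumerate-scan-for-an-index followed by re-indexing and branch extraction with a single pass that builds a partner table via dict.setdefault (first occurrence wins, [0]-side inserted first) and a final dict lookup.
import Mathlib
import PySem

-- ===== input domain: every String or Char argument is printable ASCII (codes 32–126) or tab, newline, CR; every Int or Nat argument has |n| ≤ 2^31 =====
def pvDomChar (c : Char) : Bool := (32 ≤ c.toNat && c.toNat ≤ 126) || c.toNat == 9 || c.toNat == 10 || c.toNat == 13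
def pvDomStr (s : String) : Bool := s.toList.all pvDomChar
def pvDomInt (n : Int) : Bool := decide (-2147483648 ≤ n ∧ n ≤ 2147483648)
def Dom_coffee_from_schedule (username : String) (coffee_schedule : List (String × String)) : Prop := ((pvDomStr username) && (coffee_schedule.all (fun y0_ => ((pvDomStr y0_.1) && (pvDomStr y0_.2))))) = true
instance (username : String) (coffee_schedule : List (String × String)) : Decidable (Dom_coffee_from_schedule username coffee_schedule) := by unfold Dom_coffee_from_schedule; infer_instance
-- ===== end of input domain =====

-- B replaces A's enumerate-scan-for-an-index plus re-indexing with a one-pass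
-- setdefault partner table and a final dict lookup (idiomatic; same return value).


-- ===== PORT A =====
def coffee_from_schedule (username : String) (coffee_schedule : List (String × String)) : Option String :=
  let index : Option Int :=
    ((PySem.List.enumerate coffee_schedule).find?
      (fun pt => pt.2.1 == username || pt.2.2 == username)).map (·.1)
  match index with
  | none => none
  | some i =>
    match PySem.List.pyGet? coffee_schedule i with
    | none => none  -- unreachable: the index comes from enumerate, hence in range
    | some coffee_pair =>
      if coffee_pair.1 == username then some coffee_pair.2 else some coffee_pair.1

-- ===== PORT B =====
def coffee_from_schedule_alt (username : String) (coffee_schedule : List (String × String)) : Option String :=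
  let table : PySem.Dict String String :=
    coffee_schedule.foldl
      (fun d pair => (d.setdefault pair.1 pair.2).setdefault pair.2 pair.1)
      PySem.Dict.empty
  table.get? username

-- ===== PRECONDITION & SPEC =====
def Spec_coffee_from_schedule (username : String) (coffee_schedule : List (String × String)) (out : Option String) : Prop := out = coffee_from_schedule_alt username coffee_schedule
instance (username : String) (coffee_schedule : List (String × String)) (out : Option String) : Decidable (Spec_coffee_from_schedule username coffee_schedule out) := by unfold Spec_coffee_from_schedule; infer_instance

-- ===== CLAIM (what is proved, stated in full; the proofs are below) =====
def Claim_equal_coffee_from_schedule : Prop := ∀ (username : String) (coffee_schedule : List (String × String)), Dom_coffee_from_schedule username coffee_schedule → Spec_coffee_from_schedule username coffee_schedule (coffee_from_schedule username coffee_schedule)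

-- ===== LEMMAS AND PROOFS =====

-- first-match "partner" characterisation both ports are reduced to
def pvScan (u : String) : List (String × String) → Option String
  | [] => none
  | p :: r =>
    if p.1 = u ∨ p.2 = u then (if p.1 = u then some p.2 else some p.1)
    else pvScan u r

lemma enumerate_shift {α : Type} (xs : List α) (s : Int) :
    PySem.List.enumerate xs (s + 1) = (PySem.List.enumerate xs s).map (fun p => (p.1 + 1, p.2)) := by
  induction xs generalizing s with
  | nil => simp [PySem.List.enumerate]
  | cons x r ih => simp [PySem.List.enumerate_cons, ih]

lemma A_eq_scan (u : String) (cs : List (String × String)) :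
    coffee_from_schedule u cs = pvScan u cs := by
  induction cs with
  | nil => simp [coffee_from_schedule, PySem.List.enumerate, pvScan]
  | cons x r ih =>
    by_cases hx : x.1 = u ∨ x.2 = u
    · have hb : (x.1 == u || x.2 == u) = true := by
        rcases hx with h | h <;> simp [h]
      simp only [coffee_from_schedule, PySem.List.enumerate_cons, List.find?_cons, hb,
        Option.map_some, pvScan, if_pos hx]
      by_cases h1 : x.1 = u
      · simp [PySem.List.pyGet?, PySem.List.pyIdx?, h1]
      · simp [PySem.List.pyGet?, PySem.List.pyIdx?, h1]
    · have hb : (x.1 == u || x.2 == u) = false := by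
        push Not at hx
        simp [hx.1, hx.2]
      rw [pvScan, if_neg hx, ← ih]
      simp only [coffee_from_schedule, PySem.List.enumerate_cons, List.find?_cons, hb]
      rw [show (0 : Int) + 1 = 0 + 1 from rfl, enumerate_shift r 0, List.find?_map]
      cases hf : (PySem.List.enumerate r 0).find?
          (fun pt => pt.2.1 == u || pt.2.2 == u) with
      | none => simp [hf, Function.comp_def]
      | some m =>
        -- index of the found element is ≥ 0
        have hmem := List.mem_of_find?_eq_some hf
        have hfst : m.1 ∈ (PySem.List.enumerate r 0).map (·.1) :=
          List.mem_map_of_mem hmem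
        rw [PySem.List.map_fst_enumerate] at hfst
        have h0 : 0 ≤ m.1 := ((PySem.List.mem_pyRange_one).mp (by simpa using hfst)).1
        obtain ⟨n, hn⟩ : ∃ n : Nat, m.1 = (n : Int) := ⟨m.1.toNat, (Int.toNat_of_nonneg h0).symm⟩
        have hcomp :
            (PySem.List.enumerate r 0).find?
              ((fun pt => pt.2.1 == u || pt.2.2 == u) ∘ fun p => (p.1 + 1, p.2)) = some m := by
          simpa [Function.comp_def] using hf
        simp only [hcomp, Option.map_some]
        have : PySem.List.pyGet? (x :: r) (m.1 + 1) = PySem.List.pyGet? r m.1 := by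
          rw [hn]
          have : ((n : Int) + 1) = ((n + 1 : Nat) : Int) := by push_cast; ring
          rw [this, PySem.List.pyGet?_natCast, PySem.List.pyGet?_natCast]
          simp
        rw [this]

lemma setdefault_get? (d : PySem.Dict String String) (k v x : String) :
    (d.setdefault k v).get? x = (d.get? x).or (if x = k then some v else none) := by
  unfold PySem.Dict.setdefault
  by_cases hc : d.contains k = true
  · rw [if_pos hc]
    by_cases hx : x = k
    · subst hx
      rw [PySem.Dict.contains_eq_isSome_get?] at hc
      cases h : d.get? x with
      | none => rw [h] at hc; simp at hc
      | some w => simp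
    · simp [hx]
  · rw [if_neg hc]
    have : PySem.Dict.mk (d.items ++ [(k, v)]) = d.insert k v := by
      apply PySem.Dict.ext
      rw [PySem.Dict.items_insert_of_not_contains d v (by simpa using hc)]
    rw [this, PySem.Dict.get?_insert]
    by_cases hx : x = k
    · subst hx
      have : d.get? x = none := by
        rw [PySem.Dict.contains_eq_isSome_get?] at hc
        cases h : d.get? x with
        | none => rfl
        | some w => rw [h] at hc; simp at hc
      simp [this]
    · simp [hx]

lemma B_fold_get (u : String) (cs : List (String × String)) :
    ∀ d : PySem.Dict String String,
      (cs.foldl (fun d pair => (d.setdefault pair.1 pair.2).setdefault pair.2 pair.1) d).get? u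
        = (d.get? u).or (pvScan u cs) := by
  induction cs with
  | nil => intro d; simp [pvScan]
  | cons p r ih =>
    intro d
    rw [List.foldl_cons, ih, setdefault_get?, setdefault_get?, Option.or_assoc, Option.or_assoc]
    congr 1
    by_cases h1 : u = p.1
    · simp [pvScan, h1.symm]
    · by_cases h2 : u = p.2
      · simp [pvScan, h1, h2.symm]
      · have : ¬(p.1 = u ∨ p.2 = u) := by
          push Not
          exact ⟨fun h => h1 h.symm, fun h => h2 h.symm⟩
        simp [pvScan, h1, h2, this]

lemma B_eq_scan (u : String) (cs : List (String × String)) :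
    coffee_from_schedule_alt u cs = pvScan u cs := by
  unfold coffee_from_schedule_alt
  rw [B_fold_get]
  simp

-- ===== VERDICT (by name: the statement is the Claim_ definition above) =====
theorem coffee_from_schedule_spec : Claim_equal_coffee_from_schedule := by
  intro u cs _
  unfold Spec_coffee_from_schedule
  rw [A_eq_scan, B_eq_scan]
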